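-- pv_equiv track=rewrite | github.com/Mohican999370/Learning.Python | Code.Abbey/beginner/P0023_Bubble_in_Array.py | bubble_stats
-- ===== SOURCE A (Python) =====
-- def check_sum(array: list) -> int:
--     result = 0
--
--     for number in array:
--         result = (result + number) * 113 % 10000007
--
--     return result
--
-- def swap(numbers: list, index1: int, index2: int) -> None:
--     temp = numbers[index1]
--     numbers[index1] = numbers[index2]
--     numbers[index2] = temp
--
-- def bubble_stats(numbers: list) -> tuple:
--     n_swaps = 0
--     n = len(numbers)
--
--     for j in range(n - 1):
--         if (numbers[j] > numbers[j + 1]):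
--             swap(numbers, j, j + 1)
--             n_swaps += 1
--
--     return (n_swaps, check_sum(numbers))
-- ===== SOURCE B (Python) =====
-- def bubble_stats(numbers: list) -> tuple:
--     # Carry-threading single pass: thread the bubbled maximum through the list,
--     # building the result into a fresh list, then write it back (A mutates in place).
--     if not numbers:
--         return (0, 0)
--     out = []
--     carry = numbers[0]
--     swaps = 0
--     for x in numbers[1:]:
--         if carry > x:
--             out.append(x)
--             swaps += 1
--         else:
--             out.append(carry)
--             carry = x
--     out.append(carry)
--     numbers[:] = out
--     s = 0
--     for v in out:
--         s = (s + v) * 113 % 10000007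
--     return (swaps, s)
-- ===== Notes on version B (the rewrite author's own statement) =====
-- stated objective: alternative
-- what changed: Replaces the index-based in-place swap pass with a carry-threading fold that builds a fresh list while tracking the bubbled maximum, counting swaps as carry>x events; the checksum is then taken over the new list.
import Mathlib
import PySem

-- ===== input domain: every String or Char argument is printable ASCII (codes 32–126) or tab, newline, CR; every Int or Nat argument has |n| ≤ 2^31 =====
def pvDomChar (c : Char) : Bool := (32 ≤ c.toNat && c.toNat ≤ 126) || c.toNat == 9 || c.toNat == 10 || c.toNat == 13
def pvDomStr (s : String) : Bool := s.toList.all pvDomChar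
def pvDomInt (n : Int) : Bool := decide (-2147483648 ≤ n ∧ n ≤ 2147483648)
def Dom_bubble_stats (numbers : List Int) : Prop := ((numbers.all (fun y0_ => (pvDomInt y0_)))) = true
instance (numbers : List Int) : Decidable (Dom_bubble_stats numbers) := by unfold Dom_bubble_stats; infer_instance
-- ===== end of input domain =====

-- B replaces A's index-based in-place swap pass by a carry-threading fold over the tail
-- (objective: alternative decomposition); both Pythons mutate `numbers` identically, the
-- equivalence proved is about the return value.

-- ===== PORT A =====
def check_sum (array : List Int) : Int :=
  array.foldl (fun result number => PySem.Int.mod ((result + number) * 113) 10000007) 0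

-- swap helper of A; indices used by bubble_stats are always in range, so the total
-- pyGetD/pySetD forms are exact here
def swapA (numbers : List Int) (index1 index2 : Int) : List Int :=
  let temp := PySem.List.pyGetD numbers index1 0
  let numbers' := PySem.List.pySetD numbers index1 (PySem.List.pyGetD numbers index2 0)
  PySem.List.pySetD numbers' index2 temp

def bubble_stats (numbers : List Int) : Int × Int :=
  let n : Int := numbers.length
  let st := (PySem.List.pyRange 0 (n - 1) 1).foldl
    (fun (st : List Int × Int) j =>
      if PySem.List.pyGetD st.1 j 0 > PySem.List.pyGetD st.1 (j + 1) 0 then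
        (swapA st.1 j (j + 1), st.2 + 1)
      else st)
    (numbers, 0)
  (st.2, check_sum st.1)

-- ===== PORT B =====
def check_sum_alt (out : List Int) : Int :=
  out.foldl (fun s v => PySem.Int.mod ((s + v) * 113) 10000007) 0

def bubble_stats_alt (numbers : List Int) : Int × Int :=
  match numbers with
  | [] => (0, 0)
  | c :: rest =>
    -- state (out, carry, swaps) threaded through the tail
    let st := rest.foldl
      (fun (st : List Int × Int × Int) x =>
        if st.2.1 > x then (st.1 ++ [x], st.2.1, st.2.2 + 1)
        else (st.1 ++ [st.2.1], x, st.2.2))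
      ([], c, 0)
    let out := st.1 ++ [st.2.1]
    (st.2.2, check_sum_alt out)

-- ===== PRECONDITION & SPEC =====
def Spec_bubble_stats (numbers : List Int) (out : Int × Int) : Prop := out = bubble_stats_alt numbers
instance (numbers : List Int) (out : Int × Int) : Decidable (Spec_bubble_stats numbers out) := by unfold Spec_bubble_stats; infer_instance

-- ===== CLAIM (what is proved, stated in full; the proofs are below) =====
def Claim_equal_bubble_stats : Prop := ∀ (numbers : List Int), Dom_bubble_stats numbers → Spec_bubble_stats numbers (bubble_stats numbers)

-- ===== LEMMAS AND PROOFS =====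

-- functional characterisation of one bubble pass: (emitted prefix, final carry, swaps)
def go (c : Int) : List Int → List Int × Int × Int
  | [] => ([], c, 0)
  | x :: xs =>
    if c > x then
      let r := go c xs; (x :: r.1, r.2.1, r.2.2 + 1)
    else
      let r := go x xs; (c :: r.1, r.2.1, r.2.2)

theorem go_B (xs : List Int) : ∀ (acc : List Int) (c s : Int),
    xs.foldl
      (fun (st : List Int × Int × Int) x =>
        if st.2.1 > x then (st.1 ++ [x], st.2.1, st.2.2 + 1)
        else (st.1 ++ [st.2.1], x, st.2.2))
      (acc, c, s)
    = (acc ++ (go c xs).1, (go c xs).2.1, s + (go c xs).2.2) := by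
  induction xs with
  | nil => intro acc c s; simp [go]
  | cons x xs ih =>
    intro acc c s
    by_cases h : c > x
    · simp only [List.foldl_cons, go, if_pos h, ih]
      refine congrArg₂ Prod.mk (by simp) (congrArg₂ Prod.mk rfl (by ring))
    · simp only [List.foldl_cons, go, if_neg h, ih]
      simp

theorem set_append_right {α : Type} (pre ys : List α) (k : Nat) (v : α) :
    (pre ++ ys).set (pre.length + k) v = pre ++ ys.set k v := by
  induction pre with
  | nil => simp
  | cons a pre ih => simp [Nat.succ_add, ih]

theorem pyGetD_append_length (pre : List Int) (y : Int) (ys : List Int) :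
    PySem.List.pyGetD (pre ++ y :: ys) (pre.length : Int) 0 = y := by
  simp [PySem.List.pyGetD_natCast, List.getD]

theorem pyGetD_append_length_succ (pre : List Int) (y x : Int) (ys : List Int) :
    PySem.List.pyGetD (pre ++ y :: x :: ys) ((pre.length : Int) + 1) 0 = x := by
  have : ((pre.length : Int) + 1) = ((pre.length + 1 : Nat) : Int) := by push_cast; ring
  rw [this, PySem.List.pyGetD_natCast]
  simp [List.getD]

theorem swapA_append (pre : List Int) (c x : Int) (ys : List Int) :
    swapA (pre ++ c :: x :: ys) (pre.length : Int) ((pre.length : Int) + 1)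
    = pre ++ x :: c :: ys := by
  have h1 : ((pre.length : Int) + 1) = ((pre.length + 1 : Nat) : Int) := by push_cast; ring
  unfold swapA
  rw [pyGetD_append_length, pyGetD_append_length_succ, h1,
      PySem.List.pySetD_natCast, PySem.List.pySetD_natCast]
  have e0 : (pre ++ c :: x :: ys).set pre.length x = pre ++ x :: x :: ys := by
    simpa using set_append_right pre (c :: x :: ys) 0 x
  rw [e0]
  simpa using set_append_right pre (x :: x :: ys) 1 c

theorem go_A (rest : List Int) : ∀ (pre : List Int) (c s : Int),
    (PySem.List.pyRange (pre.length : Int) ((pre.length : Int) + (rest.length : Int)) 1).foldl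
      (fun (st : List Int × Int) j =>
        if PySem.List.pyGetD st.1 j 0 > PySem.List.pyGetD st.1 (j + 1) 0 then
          (swapA st.1 j (j + 1), st.2 + 1)
        else st)
      (pre ++ c :: rest, s)
    = (pre ++ (go c rest).1 ++ [(go c rest).2.1], s + (go c rest).2.2) := by
  induction rest with
  | nil =>
    intro pre c s
    rw [PySem.List.pyRange_one_eq_nil (by simp)]
    simp [go]
  | cons x xs ih =>
    intro pre c s
    rw [PySem.List.pyRange_one_cons (by simp only [List.length_cons]; push_cast; omega)]
    simp only [List.foldl_cons]
    by_cases h : c > x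
    · rw [if_pos (by rw [pyGetD_append_length, pyGetD_append_length_succ]; exact h)]
      have harr : swapA (pre ++ c :: x :: xs) (pre.length : Int) ((pre.length : Int) + 1)
          = (pre ++ [x]) ++ c :: xs := by rw [swapA_append]; simp
      have hlen : ((pre.length : Int) + 1) = (((pre ++ [x]).length : Nat) : Int) := by
        simp
      have hend : (pre.length : Int) + ((x :: xs).length : Int)
          = (((pre ++ [x]).length : Nat) : Int) + (xs.length : Int) := by
        simp only [List.length_cons, List.length_append, List.length_nil]; push_cast; ring
      rw [harr, hend, hlen, ih]
      simp only [go, if_pos h]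
      refine congrArg₂ Prod.mk (by simp) (by ring)
    · rw [if_neg (by rw [pyGetD_append_length, pyGetD_append_length_succ]; exact h)]
      have hlen : ((pre.length : Int) + 1) = (((pre ++ [c]).length : Nat) : Int) := by
        simp
      have hend : (pre.length : Int) + ((x :: xs).length : Int)
          = (((pre ++ [c]).length : Nat) : Int) + (xs.length : Int) := by
        simp only [List.length_cons, List.length_append, List.length_nil]; push_cast; ring
      rw [show (pre ++ c :: x :: xs : List Int) = (pre ++ [c]) ++ x :: xs from by simp,
          hend, hlen, ih]
      simp only [go, if_neg h]
      refine congrArg₂ Prod.mk (by simp) rfl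

-- ===== VERDICT (by name: the statement is the Claim_ definition above) =====
theorem bubble_stats_spec : Claim_equal_bubble_stats := by
  intro numbers _
  unfold Spec_bubble_stats
  match numbers with
  | [] => decide
  | c :: rest =>
    unfold bubble_stats bubble_stats_alt
    simp only []
    rw [go_B]
    have hr : ((c :: rest).length : Int) - 1 = (rest.length : Int) := by simp only [List.length_cons]; push_cast; ring
    have := go_A rest [] c 0
    simp only [List.length_nil, Nat.cast_zero, zero_add, List.nil_append] at this
    rw [hr, this]
    simp [check_sum, check_sum_alt]
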